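-- pv_equiv track=rewrite | github.com/jeremiah-c-leary/eda-log-file-warning-suppressor | elfws/vendor/xilinx/vivado_methodology.py | is_logfile
-- ===== SOURCE A (Python) =====
-- def is_logfile(lFile):
--     bSearch = False
--     for iLineNumber, sLine in enumerate(lFile):
--         if 'Tool Version' in sLine and 'Vivado' in sLine:
--             bSearch = True
--         if bSearch and sLine.startswith('Report Methodology'):
--             return True
--         if iLineNumber == 200:
--             return False
--     return False
-- ===== SOURCE B (Python) =====
-- def is_logfile(lFile):
--     # Materialize at most the first 201 lines (index 200 inclusive), then
--     # locate the first Tool-Version/Vivado line and scan from there.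
--     lines = [line for line, _ in zip(lFile, range(201))]
--     for idx, line in enumerate(lines):
--         if 'Tool Version' in line and 'Vivado' in line:
--             return any(l.startswith('Report Methodology') for l in lines[idx:])
--     return False
-- ===== Notes on version B (the rewrite author's own statement) =====
-- stated objective: alternative
-- what changed: Replaces the flag-threaded single pass with a two-phase locate-then-scan: take the first 201 lines, find the first 'Tool Version'/'Vivado' line, then check the remaining sublist for a 'Report Methodology' prefix.
import Mathlib
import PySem

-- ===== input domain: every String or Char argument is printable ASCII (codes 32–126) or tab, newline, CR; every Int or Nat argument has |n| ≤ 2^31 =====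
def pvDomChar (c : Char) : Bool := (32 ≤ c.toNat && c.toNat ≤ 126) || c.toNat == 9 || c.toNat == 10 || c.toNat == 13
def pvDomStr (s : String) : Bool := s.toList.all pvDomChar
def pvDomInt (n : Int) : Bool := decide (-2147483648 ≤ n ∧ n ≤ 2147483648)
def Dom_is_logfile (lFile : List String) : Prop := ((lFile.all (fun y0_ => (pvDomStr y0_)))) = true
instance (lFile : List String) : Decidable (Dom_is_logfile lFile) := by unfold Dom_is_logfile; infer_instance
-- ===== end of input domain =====

-- B replaces A's flag-threaded single pass with a locate-then-scan over the first 201 lines (alternative decomposition, same cost).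

-- ===== PORT A =====
-- literal transliteration of A's enumerate loop: bSearch flag threaded, early returns, cap at index 200
def isLogfileGoA : List (Int × String) → Bool → Bool
  | [], _ => false
  | (iLineNumber, sLine) :: rest, bSearch =>
    let bSearch' := if PySem.Str.isIn "Tool Version" sLine && PySem.Str.isIn "Vivado" sLine then true else bSearch
    if bSearch' && PySem.Str.startswith sLine "Report Methodology" then true
    else if iLineNumber == 200 then false
    else isLogfileGoA rest bSearch'

def is_logfile (lFile : List String) : Bool :=
  isLogfileGoA (PySem.List.enumerate lFile 0) false

-- ===== PORT B =====
def is_logfile_alt (lFile : List String) : Bool :=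
  let lines := lFile.take 201
  match lines.findIdx? (fun l => PySem.Str.isIn "Tool Version" l && PySem.Str.isIn "Vivado" l) with
  | some idx => (lines.drop idx).any (fun l => PySem.Str.startswith l "Report Methodology")
  | none => false

-- ===== PRECONDITION & SPEC =====
def Spec_is_logfile (lFile : List String) (out : Bool) : Prop := out = is_logfile_alt lFile
instance (lFile : List String) (out : Bool) : Decidable (Spec_is_logfile lFile out) := by unfold Spec_is_logfile; infer_instance

-- ===== CLAIM (what is proved, stated in full; the proofs are below) =====
def Claim_equal_is_logfile : Prop := ∀ (lFile : List String), Dom_is_logfile lFile → Spec_is_logfile lFile (is_logfile lFile)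

-- ===== LEMMAS AND PROOFS =====

-- the Tool-Version/Vivado predicate and the Report-Methodology predicate
def pvP (l : String) : Bool := PySem.Str.isIn "Tool Version" l && PySem.Str.isIn "Vivado" l
def pvQ (l : String) : Bool := PySem.Str.startswith l "Report Methodology"

-- A's loop with the index cap removed: the uncapped flag-threaded pass
def pvGo : List String → Bool → Bool
  | [], _ => false
  | sLine :: rest, bSearch =>
    let bSearch' := if pvP sLine then true else bSearch
    if bSearch' && pvQ sLine then true else pvGo rest bSearch'

-- A's capped loop over lines enumerated from i ≤ 200 equals the uncapped pass on the first 201 - i lines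
theorem goA_eq_pvGo (ls : List String) : ∀ (i : Nat) (b : Bool), i ≤ 200 →
    isLogfileGoA (PySem.List.enumerate ls (i : Int)) b = pvGo (ls.take (201 - i)) b := by
  induction ls with
  | nil => intro i b _; simp [PySem.List.enumerate_nil, isLogfileGoA, pvGo]
  | cons s rest ih =>
    intro i b hi
    rw [PySem.List.enumerate_cons]
    by_cases h200 : i = 200
    · subst h200
      have hs : pvGo [s] b = ((pvP s || b) && pvQ s) := by
        cases hP : pvP s <;> cases b <;> simp [pvGo, hP]
      simp only [isLogfileGoA]
      norm_num
      rw [hs]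
      simp [pvP, pvQ]
    · have h1 : 201 - i = (201 - (i + 1)) + 1 := by omega
      rw [h1]
      simp only [isLogfileGoA, pvGo, pvP, pvQ, List.take_succ_cons]
      have : ((i : Int) == 200) = false := by
        rw [beq_eq_false_iff_ne]
        intro hEq
        exact h200 (by exact_mod_cast hEq)
      rw [this]
      have h2 : ((i : Int) + 1) = ((i + 1 : Nat) : Int) := by push_cast; ring
      rw [h2, ih (i + 1) _ (by omega)]
      simp

-- once the flag is set, the rest of the pass is just an 'any' over pvQ
theorem pvGo_true (ls : List String) : pvGo ls true = ls.any pvQ := by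
  induction ls with
  | nil => simp [pvGo]
  | cons s rest ih => simp [pvGo, ih]

-- the uncapped pass from a clear flag is B's locate-then-scan
theorem pvGo_false (ls : List String) :
    pvGo ls false = (match ls.findIdx? pvP with
      | some idx => (ls.drop idx).any pvQ
      | none => false) := by
  induction ls with
  | nil => simp [pvGo]
  | cons s rest ih =>
    by_cases hp : pvP s
    · simp [pvGo, hp, List.findIdx?_cons, pvGo_true, List.any_cons]
    · have h1 : pvGo (s :: rest) false = pvGo rest false := by simp [pvGo, hp]
      rw [h1, ih, List.findIdx?_cons, if_neg (by simp [hp])]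
      cases h : rest.findIdx? pvP <;> simp

-- ===== VERDICT (by name: the statement is the Claim_ definition above) =====
theorem is_logfile_spec : Claim_equal_is_logfile := by
  intro lFile _
  unfold Spec_is_logfile is_logfile is_logfile_alt
  have := goA_eq_pvGo lFile 0 false (by omega)
  norm_num at this
  rw [this, pvGo_false]
  rfl
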